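-- pv_equiv track=rewrite | github.com/wtthornton/TappsCodingAgents | tapps_agents/workflow/suggestion_engine.py | _analyze_file_types
-- ===== SOURCE A (Python) =====
-- def _analyze_file_types(files: list[str]) -> dict[str, int]:
--     """Analyze file types in changed files."""
--     types = {"test": 0, "doc": 0, "code": 0}
--     for file in files:
--         file_lower = file.lower()
--         if "test" in file_lower or "spec" in file_lower:
--             types["test"] += 1
--         elif any(ext in file_lower for ext in [".md", ".txt", ".rst"]):
--             types["doc"] += 1
--         else:
--             types["code"] += 1
--     return types
-- ===== SOURCE B (Python) =====
-- def _is_test(file: str) -> bool: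
--     fl = file.lower()
--     return "test" in fl or "spec" in fl
--
--
-- def _is_doc(file: str) -> bool:
--     fl = file.lower()
--     return any(ext in fl for ext in (".md", ".txt", ".rst")) and not _is_test(file)
--
--
-- def _analyze_file_types(files: list[str]) -> dict[str, int]:
--     """Analyze file types in changed files."""
--     test = sum(1 for f in files if _is_test(f))
--     doc = sum(1 for f in files if _is_doc(f))
--     return {"test": test, "doc": doc, "code": len(files) - test - doc}
-- ===== Notes on version B (the rewrite author's own statement) =====
-- stated objective: simpler
-- what changed: Replaces the single elif loop mutating a dict with three independent counting passes (sum-over-generator for test, doc excluding test/spec, and code derived as the remainder len - test - doc).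
import Mathlib
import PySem

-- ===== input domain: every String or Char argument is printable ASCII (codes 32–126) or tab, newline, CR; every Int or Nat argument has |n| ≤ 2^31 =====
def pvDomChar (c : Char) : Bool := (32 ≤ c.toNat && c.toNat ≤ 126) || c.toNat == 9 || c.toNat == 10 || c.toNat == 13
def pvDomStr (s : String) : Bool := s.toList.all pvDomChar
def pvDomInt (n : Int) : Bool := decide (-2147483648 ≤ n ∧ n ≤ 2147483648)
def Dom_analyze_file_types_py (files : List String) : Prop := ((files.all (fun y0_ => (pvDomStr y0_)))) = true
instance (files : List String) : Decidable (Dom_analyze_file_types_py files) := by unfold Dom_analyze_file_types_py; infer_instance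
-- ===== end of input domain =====

-- B replaces A's single elif loop over a mutable dict with three independent counting
-- passes (test, doc-excluding-test, code = remainder); objective: simpler.

-- ===== PORT A =====
def analyze_file_types_py (files : List String) : List (String × Int) :=
  let types : PySem.Dict String Int :=
    ((PySem.Dict.empty.insert "test" 0).insert "doc" 0).insert "code" 0
  (files.foldl (fun types file =>
    let file_lower := PySem.Str.lower file
    if PySem.Str.isIn "test" file_lower || PySem.Str.isIn "spec" file_lower then
      types.insert "test" (types.getD "test" 0 + 1)
    else if [".md", ".txt", ".rst"].any (fun ext => PySem.Str.isIn ext file_lower) then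
      types.insert "doc" (types.getD "doc" 0 + 1)
    else
      types.insert "code" (types.getD "code" 0 + 1)) types).items

-- ===== PORT B =====
def pvIsTest (file : String) : Bool :=
  let fl := PySem.Str.lower file
  PySem.Str.isIn "test" fl || PySem.Str.isIn "spec" fl

def pvIsDoc (file : String) : Bool :=
  let fl := PySem.Str.lower file
  ([".md", ".txt", ".rst"].any (fun ext => PySem.Str.isIn ext fl)) && !(pvIsTest file)

def analyze_file_types_py_alt (files : List String) : List (String × Int) :=
  let test : Int := (files.countP pvIsTest : Int)
  let doc : Int := (files.countP pvIsDoc : Int)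
  [("test", test), ("doc", doc), ("code", (files.length : Int) - test - doc)]

-- ===== PRECONDITION & SPEC =====
def Spec_analyze_file_types_py (files : List String) (out : List (String × Int)) : Prop := out = analyze_file_types_py_alt files
instance (files : List String) (out : List (String × Int)) : Decidable (Spec_analyze_file_types_py files out) := by unfold Spec_analyze_file_types_py; infer_instance

-- ===== CLAIM (what is proved, stated in full; the proofs are below) =====
def Claim_equal_analyze_file_types_py : Prop := ∀ (files : List String), Dom_analyze_file_types_py files → Spec_analyze_file_types_py files (analyze_file_types_py files)

-- ===== LEMMAS AND PROOFS =====

def pvHasDocExt (file : String) : Bool :=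
  [".md", ".txt", ".rst"].any (fun ext => PySem.Str.isIn ext (PySem.Str.lower file))

lemma isDoc_eq (f : String) : pvIsDoc f = (pvHasDocExt f && !(pvIsTest f)) := rfl

-- A's third ('code') predicate: neither test/spec nor a doc extension.
def pvIsCode (file : String) : Bool := !(pvIsTest file) && !(pvHasDocExt file)

-- Invariant of A's loop: the dict stays a three-entry literal, counts advancing by countP.
lemma analyze_loop_inv (files : List String) (t d c : Int) :
    files.foldl (fun types file =>
      let file_lower := PySem.Str.lower file
      if PySem.Str.isIn "test" file_lower || PySem.Str.isIn "spec" file_lower then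
        types.insert "test" (types.getD "test" 0 + 1)
      else if [".md", ".txt", ".rst"].any (fun ext => PySem.Str.isIn ext file_lower) then
        types.insert "doc" (types.getD "doc" 0 + 1)
      else
        types.insert "code" (types.getD "code" 0 + 1))
      (PySem.Dict.mk [("test", t), ("doc", d), ("code", c)])
    = PySem.Dict.mk [("test", t + (files.countP pvIsTest : Int)),
                     ("doc", d + (files.countP pvIsDoc : Int)),
                     ("code", c + (files.countP pvIsCode : Int))] := by
  induction files generalizing t d c with
  | nil => simp
  | cons f fs ih =>
    have hstep : (fun (types : PySem.Dict String Int) (file : String) =>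
        let file_lower := PySem.Str.lower file
        if PySem.Str.isIn "test" file_lower || PySem.Str.isIn "spec" file_lower then
          types.insert "test" (types.getD "test" 0 + 1)
        else if [".md", ".txt", ".rst"].any (fun ext => PySem.Str.isIn ext file_lower) then
          types.insert "doc" (types.getD "doc" 0 + 1)
        else
          types.insert "code" (types.getD "code" 0 + 1))
        = (fun types file =>
          if pvIsTest file then types.insert "test" (types.getD "test" 0 + 1)
          else if pvHasDocExt file then types.insert "doc" (types.getD "doc" 0 + 1)
          else types.insert "code" (types.getD "code" 0 + 1)) := rfl
    rw [hstep] at ih ⊢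
    rw [List.foldl_cons]
    have hT1 : (PySem.Dict.mk [("test", t), ("doc", d), ("code", c)]).insert "test"
        ((PySem.Dict.mk [("test", t), ("doc", d), ("code", c)]).getD "test" 0 + 1)
        = PySem.Dict.mk [("test", t + 1), ("doc", d), ("code", c)] := by
      apply PySem.Dict.ext
      simp [PySem.Dict.items_insert, PySem.Dict.getD_eq_get?_getD, PySem.Dict.get?_mk_cons,
            PySem.Dict.contains_mk]
    have hD1 : (PySem.Dict.mk [("test", t), ("doc", d), ("code", c)]).insert "doc"
        ((PySem.Dict.mk [("test", t), ("doc", d), ("code", c)]).getD "doc" 0 + 1)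
        = PySem.Dict.mk [("test", t), ("doc", d + 1), ("code", c)] := by
      apply PySem.Dict.ext
      simp [PySem.Dict.items_insert, PySem.Dict.getD_eq_get?_getD, PySem.Dict.get?_mk_cons,
            PySem.Dict.contains_mk]
    have hC1 : (PySem.Dict.mk [("test", t), ("doc", d), ("code", c)]).insert "code"
        ((PySem.Dict.mk [("test", t), ("doc", d), ("code", c)]).getD "code" 0 + 1)
        = PySem.Dict.mk [("test", t), ("doc", d), ("code", c + 1)] := by
      apply PySem.Dict.ext
      simp [PySem.Dict.items_insert, PySem.Dict.getD_eq_get?_getD, PySem.Dict.get?_mk_cons,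
            PySem.Dict.contains_mk]
    by_cases hT : pvIsTest f = true
    · simp only [hT, if_true, hT1, ih, List.countP_cons, isDoc_eq, pvIsCode,
        Bool.not_true]
      simp
      omega
    · simp only [Bool.not_eq_true] at hT
      by_cases hD : pvHasDocExt f = true
      · simp only [hT, hD, Bool.false_eq_true, if_false, if_true, hD1, ih]
        simp only [List.countP_cons, hT, hD, isDoc_eq, pvIsCode, Bool.not_false,
          Bool.and_true, Bool.true_and, Bool.not_true, Bool.and_false]
        simp
        omega
      · simp only [Bool.not_eq_true] at hD
        simp only [hT, hD, Bool.false_eq_true, if_false, hC1, ih]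
        simp only [List.countP_cons, hT, hD, isDoc_eq, pvIsCode, Bool.not_false,
          Bool.and_true, Bool.true_and, Bool.and_false, Bool.false_and]
        simp
        omega

-- The three predicates partition every file.
lemma countP_partition (files : List String) :
    files.countP pvIsTest + files.countP pvIsDoc + files.countP pvIsCode = files.length := by
  induction files with
  | nil => simp
  | cons f fs ih =>
    simp only [List.countP_cons, List.length_cons, isDoc_eq, pvIsCode]
    by_cases hT : pvIsTest f = true <;> by_cases hD : pvHasDocExt f = true <;>
      simp [hT, hD] <;> omega

-- ===== VERDICT (by name: the statement is the Claim_ definition above) =====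
theorem analyze_file_types_py_spec : Claim_equal_analyze_file_types_py := by
  intro files _
  unfold Spec_analyze_file_types_py analyze_file_types_py analyze_file_types_py_alt
  have h0 : ((PySem.Dict.empty.insert "test" (0 : Int)).insert "doc" 0).insert "code" 0
      = PySem.Dict.mk [("test", 0), ("doc", 0), ("code", 0)] := by decide
  have key := analyze_loop_inv files 0 0 0
  have hpart := countP_partition files
  simp only [h0, key, zero_add]
  have hc : (files.countP pvIsCode : Int)
      = (files.length : Int) - (files.countP pvIsTest : Int) - (files.countP pvIsDoc : Int) := by
    omega
  rw [hc]
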